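-- pv_equiv track=rewrite | github.com/yf591/competitive_programming | algorithms/string/z_algorithm.py | string_periods
-- ===== SOURCE A (Python) =====
-- from typing import List
--
-- def z_function(s: str) -> List[int]:
--     """
--     文字列のZアルゴリズムを実行し、Z配列を返す
--
--     Args:
--         s: 入力文字列
--
--     Returns:
--         Z配列: Z[i]は、sとs[i:]の最長共通接頭辞の長さ
--     """
--     n = len(s)
--     z = [0] * n
--
--     # 最初の要素は特別扱い（全体の文字列長）
--     z[0] = n
--
--     # Z配列を計算
--     l, r = 0, 0  # [l, r]は最右の共通接頭辞区間
--     for i in range(1, n):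
--         # 現在のiが[l,r]区間内にある場合、以前の計算結果を再利用
--         if i <= r:
--             # min(すでに計算した値, 区間の右端までの距離)
--             z[i] = min(r - i + 1, z[i - l])
--
--         # 共通接頭辞の長さを直接計算して拡張
--         while i + z[i] < n and s[z[i]] == s[i + z[i]]:
--             z[i] += 1
--
--         # 最右の共通接頭辞区間を更新
--         if i + z[i] - 1 > r:
--             l, r = i, i + z[i] - 1
--
--     return z
--
-- def string_periods(s: str) -> List[int]:
--     """
--     Zアルゴリズムを使用して文字列の全ての周期を見つける
--
--     Args:
--         s: 入力文字列
--
--     Returns: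
--         List[int]: 文字列の全ての周期のリスト
--     """
--     n = len(s)
--     z = z_function(s)
--     periods = []
--
--     # 周期の定義: p is a period of s if s[0:n-p] == s[p:n]
--     for p in range(1, n):
--         if z[p] + p >= n:  # 文字列の残りの部分が一致
--             periods.append(p)
--
--     return periods
-- ===== SOURCE B (Python) =====
-- def string_periods(s):
--     n = len(s)
--     return [p for p in range(1, n) if s[p:] == s[:n - p]]
-- ===== Notes on version B (the rewrite author's own statement) =====
-- stated objective: simpler
-- what changed: Replaces the Z-array computation entirely by a direct one-line check of the period definition (s[p:] == s[:n-p]) for each candidate p.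
import Mathlib
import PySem

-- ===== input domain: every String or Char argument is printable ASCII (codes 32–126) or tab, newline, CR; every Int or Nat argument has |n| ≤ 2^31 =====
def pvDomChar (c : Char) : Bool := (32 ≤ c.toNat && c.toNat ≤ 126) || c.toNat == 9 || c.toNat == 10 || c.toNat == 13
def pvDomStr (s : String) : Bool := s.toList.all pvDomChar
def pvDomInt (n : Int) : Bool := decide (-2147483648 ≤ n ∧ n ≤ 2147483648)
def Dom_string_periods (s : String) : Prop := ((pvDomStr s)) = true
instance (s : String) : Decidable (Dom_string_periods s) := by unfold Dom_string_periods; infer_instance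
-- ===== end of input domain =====

-- B replaces the Z-array machinery by a direct check of the period definition; objective: simpler.

-- ===== PORT A =====
-- the inner `while i + z[i] < n and s[z[i]] == s[i + z[i]]: z[i] += 1` loop
-- (all indices are provably in range in Python, so plain `getElem?` comparison is exact)
def zExtend (cs : List Char) (i : Nat) (zi : Nat) : Nat :=
  if h : i + zi < cs.length then
    if cs[zi]? = cs[i + zi]? then zExtend cs i (zi + 1) else zi
  else zi
termination_by cs.length - (i + zi)
decreasing_by omega

-- one iteration of the `for i in range(1, n)` loop of z_function, state (z, l, r)
def zStep (cs : List Char) (st : List Nat × Nat × Nat) (i : Nat) : List Nat × Nat × Nat :=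
  let z := st.1
  let l := st.2.1
  let r := st.2.2
  let zi0 := if i ≤ r then min (r - i + 1) (z.getD (i - l) 0) else z.getD i 0
  let zi := zExtend cs i zi0
  let z' := z.set i zi
  if r < i + zi - 1 then (z', i, i + zi - 1) else (z', l, r)

-- z_function (all entries are nonnegative Python ints, kept as Nat internally)
def zFunction (cs : List Char) : List Nat :=
  let n := cs.length
  let z0 := (List.replicate n 0).set 0 n
  (((List.range' 1 (n - 1)).foldl (zStep cs) (z0, 0, 0))).1

def string_periods (s : String) : List Int :=
  let cs := s.toList
  let n := cs.length
  let z := zFunction cs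
  ((List.range' 1 (n - 1)).filter (fun p => decide (n ≤ z.getD p 0 + p))).map Int.ofNat

-- ===== PORT B =====
-- `[p for p in range(1, n) if s[p:] == s[:n-p]]` (slices with 0 ≤ p ≤ n are exactly drop/take)
def string_periods_alt (s : String) : List Int :=
  let cs := s.toList
  let n := cs.length
  ((List.range' 1 (n - 1)).filter (fun p => decide (cs.drop p = cs.take (n - p)))).map Int.ofNat

-- ===== PRECONDITION & SPEC =====
-- Pre_ excludes only the empty string, on which A raises IndexError (z[0] = n on the empty list).
def Pre_string_periods (s : String) : Prop := s ≠ ""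
instance (s : String) : Decidable (Pre_string_periods s) := by unfold Pre_string_periods; infer_instance
def pvWitness_string_periods : String := "abcabcab"

def Spec_string_periods (s : String) (out : List Int) : Prop := out = string_periods_alt s
instance (s : String) (out : List Int) : Decidable (Spec_string_periods s out) := by unfold Spec_string_periods; infer_instance

-- ===== CLAIM (what is proved, stated in full; the proofs are below) =====
def Claim_equal_string_periods : Prop := ∀ (s : String), Dom_string_periods s → Pre_string_periods s → Spec_string_periods s (string_periods s)

-- ===== LEMMAS AND PROOFS =====

-- length of the longest common prefix
def lcp : List Char → List Char → Nat
  | a :: as, b :: bs => if a = b then lcp as bs + 1 else 0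
  | _, _ => 0

theorem le_lcp_iff (k : Nat) (x y : List Char) :
    k ≤ lcp x y ↔ k ≤ x.length ∧ x.take k = y.take k := by
  induction x generalizing y k with
  | nil =>
    simp only [lcp.eq_def, List.length_nil, Nat.le_zero, List.take_nil]
    constructor
    · rintro rfl; simp
    · rintro ⟨rfl, _⟩; rfl
  | cons a as ih =>
    cases y with
    | nil =>
      simp only [lcp]
      constructor
      · intro h; interval_cases k; simp_all
      · rintro ⟨hk, h⟩
        cases k with
        | zero => exact Nat.le_refl 0
        | succ k => simp at h
    | cons b bs =>
      cases k with
      | zero => simp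
      | succ k =>
        simp only [lcp]
        by_cases hab : a = b
        · subst hab
          simp only [if_true, List.take_succ_cons, List.length_cons,
            Nat.succ_le_succ_iff, List.cons.injEq, true_and]
          exact (ih k bs)
        · simp [hab, List.take_succ_cons]

-- zExtend computes the lcp of cs and its i-th suffix, starting from any valid lower bound
theorem zExtend_eq (cs : List Char) (i zi : Nat) (h : zi ≤ lcp cs (cs.drop i)) :
    zExtend cs i zi = lcp cs (cs.drop i) := by
  rw [zExtend]
  rcases Nat.lt_or_ge zi (lcp cs (cs.drop i)) with hlt | hge
  · -- the loop condition holds and we recurse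
    have hstep : zi + 1 ≤ lcp cs (cs.drop i) := hlt
    obtain ⟨hlen, htake⟩ := (le_lcp_iff (zi+1) cs (cs.drop i)).mp hstep
    have hdlen : zi + 1 ≤ (cs.drop i).length := by
      have := congrArg List.length htake
      simp only [List.length_take] at this
      omega
    have hin : i + zi < cs.length := by
      simp only [List.length_drop] at hdlen; omega
    have hchar : cs[zi]? = cs[i + zi]? := by
      have h1 : (cs.take (zi+1))[zi]? = ((cs.drop i).take (zi+1))[zi]? := by rw [htake]
      rw [List.getElem?_take_of_lt (by omega), List.getElem?_take_of_lt (by omega),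
        List.getElem?_drop] at h1
      rw [h1, Nat.add_comm]
    rw [dif_pos hin, if_pos hchar]
    exact zExtend_eq cs i (zi+1) hstep
  · -- zi = lcp; the loop condition fails
    have hzi : zi = lcp cs (cs.drop i) := Nat.le_antisymm h hge
    subst hzi
    split
    · next hin =>
      split
      · next hchar =>
        exfalso
        obtain ⟨hlen, htake⟩ := (le_lcp_iff (lcp cs (cs.drop i)) cs (cs.drop i)).mp (Nat.le_refl _)
        have hstep : lcp cs (cs.drop i) + 1 ≤ lcp cs (cs.drop i) := by
          apply (le_lcp_iff _ _ _).mpr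
          refine ⟨by omega, ?_⟩
          rw [List.take_add_one, List.take_add_one, htake]
          congr 1
          rw [List.getElem?_drop, hchar.symm]
        omega
      · rfl
    · rfl
termination_by lcp cs (cs.drop i) - zi
decreasing_by omega

-- loop invariant of z_function's fold
def ZInv (cs : List Char) (i : Nat) (st : List Nat × Nat × Nat) : Prop :=
  st.1.length = cs.length ∧
  (∀ j, 1 ≤ j → j < i → st.1.getD j 0 = lcp cs (cs.drop j)) ∧
  (∀ j, i ≤ j → st.1.getD j 0 = 0) ∧
  st.2.1 < i ∧ st.2.2 < cs.length ∧ (st.2.1 = 0 → st.2.2 = 0) ∧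
  st.2.2 + 1 - st.2.1 ≤ lcp cs (cs.drop st.2.1)

theorem lcp_le_length_right (x y : List Char) : lcp x y ≤ y.length := by
  obtain ⟨hx, ht⟩ := (le_lcp_iff (lcp x y) x y).mp (Nat.le_refl _)
  have hlen := congrArg List.length ht
  simp only [List.length_take] at hlen
  omega

theorem getD_set_self (z : List Nat) (i v : Nat) (h : i < z.length) : (z.set i v).getD i 0 = v := by
  simp [List.getD_eq_getElem?_getD, h]

theorem getD_set_ne (z : List Nat) (i v j : Nat) (h : j ≠ i) : (z.set i v).getD j 0 = z.getD j 0 := by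
  rw [List.getD_eq_getElem?_getD, List.getElem?_set_ne (fun hh => h hh.symm),
    ← List.getD_eq_getElem?_getD]

theorem zStep_inv (cs : List Char) (i : Nat) (st : List Nat × Nat × Nat)
    (h1 : 1 ≤ i) (h2 : i < cs.length) (hinv : ZInv cs i st) :
    ZInv cs (i + 1) (zStep cs st i) := by
  obtain ⟨z, l, r⟩ := st
  obtain ⟨hlen, hprev, hzero, hl, hr, hl0, hbox⟩ := hinv
  simp only at hlen hprev hzero hl hr hl0 hbox
  have hzi0 : (if i ≤ r then min (r - i + 1) (z.getD (i - l) 0) else z.getD i 0)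
      ≤ lcp cs (cs.drop i) := by
    split
    · next hir =>
      have hl1 : 1 ≤ l := by
        rcases Nat.eq_zero_or_pos l with h0 | h
        · have := hl0 h0; omega
        · exact h
      have hk1 : 1 ≤ i - l := by omega
      have hki : i - l < i := by omega
      have hLk := hprev (i - l) hk1 hki
      have hmin1 : min (r - i + 1) (z.getD (i - l) 0) ≤ r - i + 1 := Nat.min_le_left _ _
      have hzi0Lk : min (r - i + 1) (z.getD (i - l) 0) ≤ lcp cs (cs.drop (i - l)) := by
        rw [← hLk]; exact Nat.min_le_right _ _
      obtain ⟨_, htk⟩ := (le_lcp_iff _ cs (cs.drop (i - l))).mp hzi0Lk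
      obtain ⟨hmlen, htm⟩ := (le_lcp_iff (r + 1 - l) cs (cs.drop l)).mp hbox
      have hdk := congrArg (List.drop (i - l)) htm
      rw [List.drop_take, List.drop_take, List.drop_drop] at hdk
      have hlk : l + (i - l) = i := by omega
      rw [hlk] at hdk
      have hzi0m : min (r - i + 1) (z.getD (i - l) 0) ≤ r + 1 - l - (i - l) := by
        rw [show r + 1 - l - (i - l) = r - i + 1 by omega]; exact hmin1
      apply (le_lcp_iff _ cs (cs.drop i)).mpr
      refine ⟨by omega, ?_⟩
      calc List.take (min (r - i + 1) (z.getD (i - l) 0)) cs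
          = List.take (min (r - i + 1) (z.getD (i - l) 0)) (cs.drop (i - l)) := htk
        _ = List.take (min (r - i + 1) (z.getD (i - l) 0))
              ((cs.drop (i - l)).take (r + 1 - l - (i - l))) := by
            rw [List.take_take, Nat.min_eq_left hzi0m]
        _ = List.take (min (r - i + 1) (z.getD (i - l) 0))
              ((cs.drop i).take (r + 1 - l - (i - l))) := by rw [hdk]
        _ = List.take (min (r - i + 1) (z.getD (i - l) 0)) (cs.drop i) := by
            rw [List.take_take, Nat.min_eq_left hzi0m]
    · next => rw [hzero i (Nat.le_refl i)]; exact Nat.zero_le _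
  have hLi := zExtend_eq cs i _ hzi0
  have hLlen : lcp cs (cs.drop i) ≤ cs.length - i := by
    have := lcp_le_length_right cs (cs.drop i)
    simpa using this
  simp only [zStep, hLi]
  have hset_i : (z.set i (lcp cs (cs.drop i))).getD i 0 = lcp cs (cs.drop i) :=
    getD_set_self z i _ (by omega)
  have hprev' : ∀ j, 1 ≤ j → j < i + 1 → (z.set i (lcp cs (cs.drop i))).getD j 0 = lcp cs (cs.drop j) := by
    intro j hj1 hji
    rcases Nat.lt_or_ge j i with hlt | hge
    · rw [getD_set_ne z i _ j (by omega)]; exact hprev j hj1 hlt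
    · have : j = i := by omega
      subst this; exact hset_i
  have hzero' : ∀ j, i + 1 ≤ j → (z.set i (lcp cs (cs.drop i))).getD j 0 = 0 := by
    intro j hj
    rw [getD_set_ne z i _ j (by omega)]; exact hzero j (by omega)
  have hlen' : (z.set i (lcp cs (cs.drop i))).length = cs.length := by
    rw [List.length_set]; exact hlen
  split
  · next hbr =>
    refine ⟨hlen', hprev', hzero', show i < i + 1 by omega, ?_, show i = 0 → _ by omega, ?_⟩
    · show i + lcp cs (cs.drop i) - 1 < cs.length
      omega
    · show i + lcp cs (cs.drop i) - 1 + 1 - i ≤ lcp cs (cs.drop i)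
      omega
  · next hbr =>
    exact ⟨hlen', hprev', hzero', show l < i + 1 by omega, hr, hl0, hbox⟩

theorem zFold_inv (cs : List Char) (c : Nat) : ∀ (i : Nat) (st : List Nat × Nat × Nat),
    1 ≤ i → i + c ≤ cs.length → ZInv cs i st →
    ZInv cs (i + c) ((List.range' i c).foldl (zStep cs) st) := by
  induction c with
  | zero => intro i st _ _ h; simpa using h
  | succ c ih =>
    intro i st h1 h2 hinv
    rw [List.range'_succ, List.foldl_cons]
    have h := ih (i + 1) (zStep cs st i) (by omega) (by omega)
      (zStep_inv cs i st h1 (by omega) hinv)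
    rw [show i + (c + 1) = i + 1 + c by omega]
    exact h

theorem zFunction_getD (cs : List Char) (p : Nat) (h0 : cs ≠ []) (h1 : 1 ≤ p) (h2 : p < cs.length) :
    (zFunction cs).getD p 0 = lcp cs (cs.drop p) := by
  have hn : 0 < cs.length := List.length_pos_of_ne_nil h0
  have hinit : ZInv cs 1 ((List.replicate cs.length 0).set 0 cs.length, 0, 0) := by
    refine ⟨by simp, fun j hj1 hj2 => absurd hj2 (by omega), ?_, Nat.zero_lt_one, hn, fun _ => rfl, ?_⟩
    · intro j hj
      rw [getD_set_ne _ _ _ _ (by omega)]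
      simp only [List.getD_eq_getElem?_getD, List.getElem?_replicate]
      split <;> rfl
    · show 0 + 1 - 0 ≤ lcp cs (cs.drop 0)
      rw [List.drop_zero]
      exact (le_lcp_iff 1 cs cs).mpr ⟨hn, rfl⟩
  have h := zFold_inv cs (cs.length - 1) 1 _ (Nat.le_refl 1) (by omega) hinit
  rw [show 1 + (cs.length - 1) = cs.length by omega] at h
  exact h.2.1 p h1 h2

-- ===== VERDICT (by name: the statement is the Claim_ definition above) =====
theorem string_periods_spec : Claim_equal_string_periods := by
  intro s _ hpre
  unfold Spec_string_periods string_periods string_periods_alt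
  simp only
  have h0 : s.toList ≠ [] := fun h => hpre (String.toList_eq_nil_iff.mp h)
  have hn : 0 < s.toList.length := List.length_pos_of_ne_nil h0
  congr 1
  apply List.filter_congr
  intro p hp
  rw [List.mem_range'_1] at hp
  obtain ⟨hp1, hp2⟩ := hp
  have hpn : p < s.toList.length := by omega
  rw [zFunction_getD s.toList p h0 hp1 hpn]
  simp only [decide_eq_decide]
  constructor
  · intro hge
    have hle := lcp_le_length_right s.toList (s.toList.drop p)
    simp only [List.length_drop] at hle
    obtain ⟨_, ht⟩ := (le_lcp_iff (s.toList.length - p) s.toList (s.toList.drop p)).mp (by omega)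
    have hdl : List.take (s.toList.length - p) (s.toList.drop p) = s.toList.drop p :=
      List.take_of_length_le (by simp)
    rw [hdl] at ht
    exact ht.symm
  · intro heq
    have hge : s.toList.length - p ≤ lcp s.toList (s.toList.drop p) := by
      apply (le_lcp_iff _ _ _).mpr
      refine ⟨by omega, ?_⟩
      rw [heq, List.take_take, Nat.min_self]
    omega
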